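-- pv_equiv track=rewrite | github.com/theodoreln/sankey_diagram | Sankey_Diagram.py | sankey_clean_flow
-- ===== SOURCE A (Python) =====
-- def sankey_clean_flow(source, target, value) :
--     flow = list(zip(source, target))
--     source2 = []
--     target2 = []
--     value2 = []
--     for i in range(len(flow)) :
--         if value[i] != 0 :
--             flow2 = list(zip(source2, target2))
--             if flow[i] in flow2 :
--                 index = flow2.index(flow[i])
--                 value2[index] = value2[index] + value[i]
--             else :
--                 source2.append(flow[i][0])
--                 target2.append(flow[i][1])
--                 value2.append(value[i])
--     return(source2, target2, value2)
-- ===== SOURCE B (Python) =====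
-- def sankey_clean_flow(source, target, value):
--     # staged group-by: filter nonzero flows, dedupe keys in first-seen order, then sum per key
--     kept = [(p, v) for p, v in zip(zip(source, target), value) if v != 0]
--     order = list(dict.fromkeys(p for p, _ in kept))
--     source2 = [s for s, _ in order]
--     target2 = [t for _, t in order]
--     value2 = [sum(v for p, v in kept if p == q) for q in order]
--     return (source2, target2, value2)
-- ===== Notes on version B (the rewrite author's own statement) =====
-- stated objective: simpler
-- what changed: Replaces A's single stateful pass (three parallel output lists mutated in place via a rebuilt flow2 membership test and list.index) with a staged group-by: one filter pass keeping nonzero (pair, v) entries, an ordered dedup of the keys, and a per-key summation pass; no output list is ever mutated.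
import Mathlib
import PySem

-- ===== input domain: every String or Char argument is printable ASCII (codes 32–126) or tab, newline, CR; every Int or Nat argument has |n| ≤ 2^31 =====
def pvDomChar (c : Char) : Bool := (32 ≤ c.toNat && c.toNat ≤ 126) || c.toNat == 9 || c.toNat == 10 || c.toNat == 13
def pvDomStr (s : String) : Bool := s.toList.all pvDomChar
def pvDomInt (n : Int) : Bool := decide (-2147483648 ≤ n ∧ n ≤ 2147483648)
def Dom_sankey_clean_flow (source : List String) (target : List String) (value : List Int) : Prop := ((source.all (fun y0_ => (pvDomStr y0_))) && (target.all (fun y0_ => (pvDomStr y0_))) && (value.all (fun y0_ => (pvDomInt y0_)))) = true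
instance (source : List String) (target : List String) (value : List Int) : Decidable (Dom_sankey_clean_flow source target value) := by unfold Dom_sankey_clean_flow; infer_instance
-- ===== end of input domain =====

-- B replaces A's single stateful pass (parallel output lists updated in place through a
-- membership test and list.index) with a staged group-by: filter the nonzero (pair, value)
-- entries, dedupe the keys in first-seen order, then sum the values per key (objective: simpler).

-- ===== PORT A =====
-- loop body of A: the work done for index i, given flow[i] and value[i]
def pvStepA (st : List String × List String × List Int) (p : String × String) (v : Int) :
    List String × List String × List Int :=
  if v ≠ 0 then
    -- flow2 = list(zip(source2, target2)); 'flow[i] in flow2' and 'flow2.index(flow[i])' as one match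
    match PySem.List.index? (st.1.zip st.2.1) p with
    | some idx =>
        (st.1, st.2.1,
          PySem.List.pySetD st.2.2 (idx : Int) (PySem.List.pyGetD st.2.2 (idx : Int) 0 + v))
    | none => (st.1 ++ [p.1], st.2.1 ++ [p.2], st.2.2 ++ [v])
  else st

def sankey_clean_flow (source : List String) (target : List String) (value : List Int) :
    List String × List String × List Int :=
  let flow := source.zip target
  (PySem.List.pyRange 0 (flow.length : Int) 1).foldl
    (fun st i => pvStepA st (PySem.List.pyGetD flow i ("", "")) (PySem.List.pyGetD value i 0))
    ([], [], [])

-- ===== PORT B =====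
-- B's staged group-by on the zipped (pair, value) list, mirroring Source B line by line
def pvStagedB (L : List ((String × String) × Int)) : List String × List String × List Int :=
  let kept := L.filter (fun pv => pv.2 != 0)
  let order := PySem.List.dedup (kept.map Prod.fst)
  (order.map Prod.fst, order.map Prod.snd,
   order.map (fun q => ((kept.filter (fun pv => pv.1 == q)).map Prod.snd).sum))

def sankey_clean_flow_alt (source : List String) (target : List String) (value : List Int) :
    List String × List String × List Int :=
  pvStagedB ((source.zip target).zip value)

-- ===== PRECONDITION & SPEC =====
-- Pre_ excludes exactly the inputs where A raises IndexError: value shorter than zip(source, target).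
def Pre_sankey_clean_flow (source : List String) (target : List String) (value : List Int) : Prop :=
  min source.length target.length ≤ value.length
instance (source : List String) (target : List String) (value : List Int) : Decidable (Pre_sankey_clean_flow source target value) := by unfold Pre_sankey_clean_flow; infer_instance

def pvWitness_sankey_clean_flow : List String × List String × List Int :=
  (["a", "b", "a"], ["x", "y", "x"], [1, 2, 3])

def Spec_sankey_clean_flow (source : List String) (target : List String) (value : List Int) (out : List String × List String × List Int) : Prop := out = sankey_clean_flow_alt source target value
instance (source : List String) (target : List String) (value : List Int) (out : List String × List String × List Int) : Decidable (Spec_sankey_clean_flow source target value out) := by unfold Spec_sankey_clean_flow; infer_instance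

-- ===== CLAIM (what is proved, stated in full; the proofs are below) =====
def Claim_equal_sankey_clean_flow : Prop := ∀ (source : List String) (target : List String) (value : List Int), Dom_sankey_clean_flow source target value → Pre_sankey_clean_flow source target value → Spec_sankey_clean_flow source target value (sankey_clean_flow source target value)

-- ===== LEMMAS AND PROOFS =====

-- A's index loop over range(len(flow)), reading flow[i] and value[i], is the fold over zip(flow, value)
theorem pvFoldl_pyRange_zip_aux {α β σ : Type} (xs : List α) (ys : List β) (da : α) (db : β)
    (g : σ → α → β → σ) (h : xs.length ≤ ys.length) :
    ∀ (n k : Nat) (init : σ), xs.length - k = n → k ≤ xs.length →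
      (PySem.List.pyRange (k : Int) (xs.length : Int) 1).foldl
          (fun st i => g st (PySem.List.pyGetD xs i da) (PySem.List.pyGetD ys i db)) init
        = ((xs.zip ys).drop k).foldl (fun st p => g st p.1 p.2) init := by
  intro n
  induction n with
  | zero =>
      intro k init hn hk
      have hk' : k = xs.length := by omega
      subst hk'
      rw [PySem.List.pyRange_one_eq_nil (le_refl _)]
      rw [List.drop_eq_nil_of_le (by rw [List.length_zip]; omega)]
      rfl
  | succ m ih =>
      intro k init hn hk
      have hklt : k < xs.length := by omega
      have hkys : k < ys.length := by omega
      rw [PySem.List.pyRange_one_cons (by exact_mod_cast hklt)]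
      rw [List.foldl_cons]
      have hz : k < (xs.zip ys).length := by simp [List.length_zip]; omega
      rw [List.drop_eq_getElem_cons hz, List.foldl_cons]
      have e1 : PySem.List.pyGetD xs (k : Int) da = xs[k] := by
        rw [PySem.List.pyGetD_natCast]; exact List.getD_eq_getElem xs da hklt
      have e2 : PySem.List.pyGetD ys (k : Int) db = ys[k] := by
        rw [PySem.List.pyGetD_natCast]; exact List.getD_eq_getElem ys db hkys
      have e3 : ((k : Int) + 1) = ((k + 1 : Nat) : Int) := by push_cast; ring
      rw [e1, e2, e3, List.getElem_zip]
      exact ih (k + 1) _ (by omega) (by omega)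

-- a map over a nodup list whose function changes only at the element at index idx is a List.set
theorem pvMap_eq_set_of_nodup {α β : Type} (order : List α) (f g : α → β) (p : α) (idx : Nat)
    (hnd : order.Nodup) (hlt : idx < order.length) (hat : order[idx] = p)
    (hfg : ∀ q, q ≠ p → g q = f q) :
    order.map g = (order.map f).set idx (g p) := by
  apply List.ext_getElem
  · simp
  · intro j hj hj'
    simp only [List.length_map] at hj
    by_cases hjidx : j = idx
    · subst hjidx
      rw [List.getElem_map, List.getElem_set_self (by simpa using hj), hat]
    · rw [List.getElem_map, List.getElem_set_ne (by omega)]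
      rw [List.getElem_map]
      exact hfg _ (fun he => hjidx (hnd.getElem_inj_iff.mp (by rw [hat, he])))

-- zip of the two projection maps is the identity on a list of pairs
theorem pvZip_map_proj (order : List (String × String)) :
    (order.map Prod.fst).zip (order.map Prod.snd) = order := by
  rw [List.zip_map']; simp

-- the per-key sum function of B's third pass
def pvF (kept : List ((String × String) × Int)) (q : String × String) : Int :=
  ((kept.filter (fun pv => pv.1 == q)).map Prod.snd).sum

-- pvStagedB written with its three components named
theorem pvStagedB_eq (L : List ((String × String) × Int)) :
    pvStagedB L
      = ((PySem.List.dedup ((L.filter (fun pv => pv.2 != 0)).map Prod.fst)).map Prod.fst,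
         (PySem.List.dedup ((L.filter (fun pv => pv.2 != 0)).map Prod.fst)).map Prod.snd,
         (PySem.List.dedup ((L.filter (fun pv => pv.2 != 0)).map Prod.fst)).map
           (pvF (L.filter (fun pv => pv.2 != 0)))) := rfl

-- pvStepA on an explicit triple of lists
theorem pvStepA_def (s t : List String) (w : List Int) (p : String × String) (v : Int) :
    pvStepA (s, t, w) p v
      = if v ≠ 0 then
          match PySem.List.index? (s.zip t) p with
          | some idx =>
              (s, t, PySem.List.pySetD w (idx : Int) (PySem.List.pyGetD w (idx : Int) 0 + v))
          | none => (s ++ [p.1], t ++ [p.2], w ++ [v])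
        else (s, t, w) := rfl

-- the per-key sum after appending one kept entry
theorem pvF_append (kept : List ((String × String) × Int)) (p : String × String) (v : Int)
    (q : String × String) :
    pvF (kept ++ [(p, v)]) q = pvF kept q + (if p = q then v else 0) := by
  unfold pvF
  rw [List.filter_append]
  by_cases hpq : p = q <;> simp [hpq]

-- one A-step on B's staged result for L is B's staged result for L ++ [(p, v)]
theorem pvStep_staged (L : List ((String × String) × Int)) (p : String × String) (v : Int) :
    pvStepA (pvStagedB L) p v = pvStagedB (L ++ [(p, v)]) := by
  by_cases hv : v = 0
  · simp [pvStepA, pvStagedB, hv]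
  · have hkept : (L ++ [(p, v)]).filter (fun pv => pv.2 != 0)
        = L.filter (fun pv => pv.2 != 0) ++ [(p, v)] := by
      rw [List.filter_append]; simp [hv]
    set kept := L.filter (fun pv => pv.2 != 0) with hk
    set order := PySem.List.dedup (kept.map Prod.fst) with ho
    have hfg : ∀ q, q ≠ p → pvF (kept ++ [(p, v)]) q = pvF kept q := by
      intro q hq
      rw [pvF_append]; simp [Ne.symm hq]
    have hnd : order.Nodup := PySem.List.nodup_dedup _
    have horder' : PySem.List.dedup ((kept ++ [(p, v)]).map Prod.fst)
        = PySem.Set.add order p := by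
      rw [List.map_append, List.map_singleton, PySem.List.dedup_eq_ofList,
        PySem.Set.ofList_append_singleton, ← PySem.List.dedup_eq_ofList, ← ho]
    have hB1 : pvStagedB L
        = (order.map Prod.fst, order.map Prod.snd, order.map (pvF kept)) := rfl
    have hB2 : pvStagedB (L ++ [(p, v)])
        = ((PySem.Set.add order p).map Prod.fst, (PySem.Set.add order p).map Prod.snd,
           (PySem.Set.add order p).map (pvF (kept ++ [(p, v)]))) := by
      rw [pvStagedB_eq, hkept, horder']
    rw [hB1, hB2]
    by_cases hp : p ∈ order
    · -- existing pair: A updates value2 at the first index of p; B's sums change only at that key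
      rw [PySem.Set.add_of_mem hp]
      obtain ⟨idx, hidx⟩ := Option.isSome_iff_exists.mp
        ((PySem.List.index?_isSome_iff order p).mpr hp)
      obtain ⟨hlt, hat, _⟩ := PySem.List.getElem_of_index?_eq_some hidx
      rw [pvStepA_def, if_pos hv, pvZip_map_proj order, hidx]
      refine Prod.ext rfl (Prod.ext rfl ?_)
      have hget : PySem.List.pyGetD (order.map (pvF kept)) (idx : Int) 0 = pvF kept p := by
        rw [PySem.List.pyGetD_natCast,
          List.getD_eq_getElem _ 0 (by simpa using hlt), List.getElem_map, hat]
      have hfp' : pvF (kept ++ [(p, v)]) p = pvF kept p + v := by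
        rw [pvF_append]; simp
      simp only []
      rw [hget, PySem.List.pySetD_natCast,
        pvMap_eq_set_of_nodup order (pvF kept) (pvF (kept ++ [(p, v)])) p idx hnd hlt hat hfg,
        hfp']
    · -- new pair: A appends to all three lists; B's dedup appends the key
      rw [PySem.Set.add_of_not_mem hp]
      have hnone : PySem.List.index? order p = none :=
        (PySem.List.index?_eq_none_iff _ _).mpr hp
      rw [pvStepA_def, if_pos hv, pvZip_map_proj order, hnone]
      have hpk : p ∉ kept.map Prod.fst := by
        intro hm; exact hp (by rw [ho, PySem.List.mem_dedup]; exact hm)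
      have hfp0 : pvF kept p = 0 := by
        unfold pvF
        have hnil : kept.filter (fun pv => pv.1 == p) = [] := by
          rw [List.filter_eq_nil_iff]
          intro a ha hq
          have h1 : a.1 = p := by simpa using hq
          exact absurd (by rw [← h1]; exact List.mem_map_of_mem ha) hpk
        rw [hnil]; rfl
      have hfp' : pvF (kept ++ [(p, v)]) p = v := by
        rw [pvF_append, hfp0]; simp
      have hmapf' : order.map (pvF (kept ++ [(p, v)])) = order.map (pvF kept) := by
        apply List.map_congr_left
        intro q hq
        exact hfg q (fun he => hp (he ▸ hq))
      simp [List.map_append, hmapf', hfp']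

-- A's fold from the empty state is B's staged group-by
theorem pvFold_eq_staged (L : List ((String × String) × Int)) :
    L.foldl (fun st pv => pvStepA st pv.1 pv.2) ([], [], []) = pvStagedB L := by
  induction L using List.reverseRecOn with
  | nil => rfl
  | append_singleton L pv ih =>
      rw [List.foldl_append, List.foldl_cons, List.foldl_nil, ih]
      exact pvStep_staged L pv.1 pv.2

-- ===== VERDICT (by name: the statement is the Claim_ definition above) =====
theorem sankey_clean_flow_spec : Claim_equal_sankey_clean_flow := by
  intro source target value _ hpre
  unfold Spec_sankey_clean_flow sankey_clean_flow sankey_clean_flow_alt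
  simp only []
  unfold Pre_sankey_clean_flow at hpre
  have hlen : (source.zip target).length ≤ value.length := by
    rw [List.length_zip]; exact hpre
  have hbr := pvFoldl_pyRange_zip_aux (source.zip target) value ("", "") 0
    (fun st p v => pvStepA st p v) hlen ((source.zip target).length) 0 ([], [], [])
    (by omega) (by omega)
  rw [Nat.cast_zero, List.drop_zero] at hbr
  rw [hbr]
  exact pvFold_eq_staged _
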